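-- pv_equiv track=rewrite | github.com/mengjihua/Cross-Fire | bisect/Min Max MEX.py | check
-- ===== SOURCE A (Python) =====
-- def check(v, k, m):
--     cnt = 0
--     current_set = set()
--     cur_mex = 0
--     max_relevant = len(v) + 1  # 过滤无关大数
--     for x in v:
--         if x <= max_relevant:
--             current_set.add(x)
--         # 更新当前MEX
--         while cur_mex in current_set:
--             cur_mex += 1
--         # 满足条件则分割
--         if cur_mex >= m:
--             cnt += 1
--             current_set = set()
--             cur_mex = 0
--     return cnt >= k
-- ===== SOURCE B (Python) =====
-- def check(v, k, m):
--     cnt = 0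
--     seen = set()
--     for x in v:
--         if 0 <= x < m:
--             seen.add(x)
--         if len(seen) >= m:
--             cnt += 1
--             seen = set()
--     return cnt >= k
-- ===== Notes on version B (the rewrite author's own statement) =====
-- stated objective: simpler
-- what changed: Replaces the growing value set plus incremental MEX pointer (with its inner while-loop and the len(v)+1 relevance filter) by a per-segment set of only the required values 0..m-1 whose cardinality is compared to m.
import Mathlib
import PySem

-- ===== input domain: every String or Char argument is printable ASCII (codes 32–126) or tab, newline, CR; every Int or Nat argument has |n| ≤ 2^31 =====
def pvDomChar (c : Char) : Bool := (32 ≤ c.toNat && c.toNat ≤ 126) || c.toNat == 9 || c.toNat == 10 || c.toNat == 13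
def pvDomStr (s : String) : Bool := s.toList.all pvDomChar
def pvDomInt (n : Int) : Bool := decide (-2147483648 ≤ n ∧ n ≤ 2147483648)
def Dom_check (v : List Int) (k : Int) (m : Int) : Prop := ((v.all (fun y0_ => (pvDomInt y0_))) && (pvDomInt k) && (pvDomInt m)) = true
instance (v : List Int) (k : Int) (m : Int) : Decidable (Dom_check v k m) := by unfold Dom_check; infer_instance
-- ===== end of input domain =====

-- B replaces A's growing value set + incremental MEX pointer (inner while-loop) by a per-segment
-- set of required values 0..m-1 whose cardinality is compared to m; objective: simpler.

-- ===== PORT A =====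
-- the 'while cur_mex in current_set' loop: fuel s.length+1 always suffices (the loop can hit
-- each distinct element of the set at most once)
def checkAdvance (s : PySem.Set Int) (j : Int) (fuel : Nat) : Int :=
  match fuel with
  | 0 => j
  | fuel + 1 => if j ∈ s then checkAdvance s (j + 1) fuel else j

def checkGo (maxRel : Int) (m : Int) (rest : List Int) (cnt : Int)
    (s : PySem.Set Int) (mex : Int) : Int :=
  match rest with
  | [] => cnt
  | x :: rest =>
    let s1 : PySem.Set Int := if x ≤ maxRel then PySem.Set.add s x else s
    let mex1 := checkAdvance s1 mex (s1.length + 1)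
    if mex1 ≥ m then checkGo maxRel m rest (cnt + 1) PySem.Set.empty 0
    else checkGo maxRel m rest cnt s1 mex1

def check (v : List Int) (k : Int) (m : Int) : Bool :=
  decide (checkGo ((v.length : Int) + 1) m v 0 PySem.Set.empty 0 ≥ k)

-- ===== PORT B =====
def checkAltGo (m : Int) (rest : List Int) (cnt : Int) (seen : PySem.Set Int) : Int :=
  match rest with
  | [] => cnt
  | x :: rest =>
    let seen1 : PySem.Set Int := if 0 ≤ x ∧ x < m then PySem.Set.add seen x else seen
    if (seen1.length : Int) ≥ m then checkAltGo m rest (cnt + 1) PySem.Set.empty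
    else checkAltGo m rest cnt seen1

def check_alt (v : List Int) (k : Int) (m : Int) : Bool :=
  decide (checkAltGo m v 0 PySem.Set.empty ≥ k)

-- ===== PRECONDITION & SPEC =====
def Spec_check (v : List Int) (k : Int) (m : Int) (out : Bool) : Prop := out = check_alt v k m
instance (v : List Int) (k : Int) (m : Int) (out : Bool) : Decidable (Spec_check v k m out) := by unfold Spec_check; infer_instance

-- ===== CLAIM (what is proved, stated in full; the proofs are below) =====
def Claim_equal_check : Prop := ∀ (v : List Int) (k : Int) (m : Int), Dom_check v k m → Spec_check v k m (check v k m)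

-- ===== LEMMAS AND PROOFS =====

theorem countP_succ_lt (s : List Int) (j : Int) (h : j ∈ s) :
    s.countP (fun x => decide (j + 1 ≤ x)) < s.countP (fun x => decide (j ≤ x)) := by
  induction s with
  | nil => cases h
  | cons a s ih =>
    rcases List.mem_cons.1 h with rfl | h
    · have hmono : s.countP (fun x => decide (j + 1 ≤ x)) ≤ s.countP (fun x => decide (j ≤ x)) := by
        apply List.countP_mono_left
        intro x _ hx
        simp only [decide_eq_true_eq] at *
        omega
      rw [List.countP_cons, List.countP_cons]
      simp only [decide_eq_true_eq]
      split_ifs <;> omega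
    · have := ih h
      rw [List.countP_cons, List.countP_cons]
      simp only [decide_eq_true_eq]
      split_ifs <;> omega

theorem checkAdvance_spec (fuel : Nat) (s : List Int) (j : Int)
    (hf : s.countP (fun x => decide (j ≤ x)) < fuel) :
    j ≤ checkAdvance s j fuel ∧ checkAdvance s j fuel ∉ s ∧
      ∀ i, j ≤ i → i < checkAdvance s j fuel → i ∈ s := by
  induction fuel generalizing j with
  | zero => omega
  | succ fuel ih =>
    simp only [checkAdvance]
    by_cases hj : j ∈ s
    · simp only [if_pos hj]
      have hlt := countP_succ_lt s j hj
      obtain ⟨h1, h2, h3⟩ := ih (j + 1) (by omega)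
      refine ⟨by omega, h2, ?_⟩
      intro i hi1 hi2
      rcases eq_or_lt_of_le hi1 with rfl | hlt'
      · exact hj
      · exact h3 i (by omega) hi2
    · simp only [if_neg hj]
      exact ⟨le_refl _, hj, fun i h1 h2 => absurd (lt_of_le_of_lt h1 h2) (lt_irrefl j)⟩

-- the full invariant tying A's state (s, mex) to B's state (seen)
def InvAB (maxRel m : Int) (restLen : Nat) (s seen : List Int) (mex : Int) : Prop :=
  s.Nodup ∧ seen.Nodup ∧ 0 ≤ mex ∧ mex ∉ s ∧
  (∀ i : Int, 0 ≤ i → i < mex → i ∈ s) ∧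
  (∀ y ∈ seen, 0 ≤ y ∧ y < m ∧ (y ≤ maxRel → y ∈ s)) ∧
  (∀ y : Int, y ∈ s → 0 ≤ y → y < m → y ∈ seen) ∧
  ((seen.length : Int) + (restLen : Int) + 1 ≤ maxRel)

theorem length_ge_of_subset_Ico (seen : List Int) (m : Int) (hnd : seen.Nodup)
    (hall : ∀ y : Int, 0 ≤ y → y < m → y ∈ seen) (hm : 0 < m) :
    m ≤ (seen.length : Int) := by
  have hsub : Finset.Ico (0 : Int) m ⊆ seen.toFinset := by
    intro y hy
    rw [Finset.mem_Ico] at hy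
    exact List.mem_toFinset.2 (hall y hy.1 hy.2)
  have hcard := Finset.card_le_card hsub
  rw [Int.card_Ico] at hcard
  have : seen.toFinset.card = seen.length := by
    rw [List.toFinset_card_of_nodup hnd]
  rw [this] at hcard
  omega

theorem length_le_of_mem_Ico (seen : List Int) (m : Int) (hnd : seen.Nodup)
    (hmem : ∀ y ∈ seen, 0 ≤ y ∧ y < m) :
    (seen.length : Int) ≤ max m 0 := by
  have hsub : seen.toFinset ⊆ Finset.Ico (0 : Int) m := by
    intro y hy
    rw [List.mem_toFinset] at hy
    rw [Finset.mem_Ico]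
    exact hmem y hy
  have hcard := Finset.card_le_card hsub
  rw [Int.card_Ico, List.toFinset_card_of_nodup hnd] at hcard
  omega

theorem mem_of_length_ge (seen : List Int) (m y : Int) (hnd : seen.Nodup)
    (hmem : ∀ z ∈ seen, 0 ≤ z ∧ z < m) (hlen : m ≤ (seen.length : Int))
    (hy : 0 ≤ y) (hym : y < m) : y ∈ seen := by
  have hsub : seen.toFinset ⊆ Finset.Ico (0 : Int) m := by
    intro z hz
    rw [List.mem_toFinset] at hz
    rw [Finset.mem_Ico]
    exact hmem z hz
  have heq : seen.toFinset = Finset.Ico (0 : Int) m := by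
    apply Finset.eq_of_subset_of_card_le hsub
    rw [Int.card_Ico, List.toFinset_card_of_nodup hnd]
    omega
  have : y ∈ seen.toFinset := by
    rw [heq, Finset.mem_Ico]; exact ⟨hy, hym⟩
  exact List.mem_toFinset.1 this

theorem go_eq (maxRel m : Int) (rest : List Int) (cnt : Int) (s seen : List Int) (mex : Int)
    (hinv : InvAB maxRel m rest.length s seen mex) :
    checkGo maxRel m rest cnt s mex = checkAltGo m rest cnt seen := by
  induction rest generalizing cnt s seen mex with
  | nil => rfl
  | cons x rest ih =>
    obtain ⟨hsnd, hseennd, hmex0, hmexnot, hbelow, hseenmem, hseencov, hlen⟩ := hinv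
    simp only [checkGo, checkAltGo]
    set s1 : PySem.Set Int := if x ≤ maxRel then PySem.Set.add s x else s with hs1
    set seen1 : PySem.Set Int := if 0 ≤ x ∧ x < m then PySem.Set.add seen x else seen with hseen1
    -- basic facts about s1 and seen1
    have hs1nd : s1.Nodup := by
      rw [hs1]; split_ifs
      · exact PySem.Set.nodup_add _ _ hsnd
      · exact hsnd
    have hseen1nd : seen1.Nodup := by
      rw [hseen1]; split_ifs
      · exact PySem.Set.nodup_add _ _ hseennd
      · exact hseennd
    have hs1mem : ∀ y : Int, y ∈ s1 ↔ (y ∈ s ∨ (y = x ∧ x ≤ maxRel)) := by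
      intro y; rw [hs1]; split_ifs with hc
      · rw [PySem.Set.mem_add]; tauto
      · tauto
    have hseen1mem : ∀ y : Int, y ∈ seen1 ↔ (y ∈ seen ∨ (y = x ∧ 0 ≤ x ∧ x < m)) := by
      intro y; rw [hseen1]; split_ifs with hc
      · rw [PySem.Set.mem_add]; tauto
      · tauto
    have hseen1len : (seen1.length : Int) ≤ (seen.length : Int) + 1 := by
      rw [hseen1]; split_ifs
      · rw [PySem.Set.add_eq_ite]; split_ifs <;> simp
      · omega
    have hseen1bound : ∀ y ∈ seen1, 0 ≤ y ∧ y < m := by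
      intro y hy
      rcases (hseen1mem y).1 hy with h | ⟨rfl, h1, h2⟩
      · exact ⟨(hseenmem y h).1, (hseenmem y h).2.1⟩
      · exact ⟨h1, h2⟩
    -- invariants for (s1, seen1)
    have hseen1s1 : ∀ y ∈ seen1, 0 ≤ y ∧ y < m ∧ (y ≤ maxRel → y ∈ s1) := by
      intro y hy
      rcases (hseen1mem y).1 hy with h | ⟨rfl, h1, h2⟩
      · obtain ⟨a, b, c⟩ := hseenmem y h
        exact ⟨a, b, fun hle => (hs1mem y).2 (Or.inl (c hle))⟩
      · exact ⟨h1, h2, fun hle => (hs1mem y).2 (Or.inr ⟨rfl, hle⟩)⟩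
    have hs1seen1 : ∀ y : Int, y ∈ s1 → 0 ≤ y → y < m → y ∈ seen1 := by
      intro y hy h0 hm
      rcases (hs1mem y).1 hy with h | ⟨rfl, _⟩
      · exact (hseen1mem y).2 (Or.inl (hseencov y h h0 hm))
      · exact (hseen1mem y).2 (Or.inr ⟨rfl, h0, hm⟩)
    -- the advanced mex
    have hfuel : s1.countP (fun t => decide (mex ≤ t)) < s1.length + 1 :=
      Nat.lt_succ_of_le List.countP_le_length
    obtain ⟨hadv1, hadv2, hadv3⟩ := checkAdvance_spec (s1.length + 1) s1 mex hfuel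
    set mex1 := checkAdvance s1 mex (s1.length + 1) with hmex1
    have hbelow1 : ∀ i : Int, 0 ≤ i → i < mex1 → i ∈ s1 := by
      intro i h0 hi
      by_cases hcase : i < mex
      · exact (hs1mem i).2 (Or.inl (hbelow i h0 hcase))
      · exact hadv3 i (by omega) hi
    -- the split conditions coincide
    have hcond : (mex1 ≥ m) ↔ ((seen1.length : Int) ≥ m) := by
      constructor
      · intro hge
        by_cases hm : 0 < m
        · apply length_ge_of_subset_Ico seen1 m hseen1nd _ hm
          intro y h0 hym
          exact hs1seen1 y (hbelow1 y h0 (by omega)) h0 hym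
        · have : (0:Int) ≤ (seen1.length : Int) := Int.natCast_nonneg _
          omega
      · intro hge
        by_cases hm : 0 < m
        · -- seen1 must be exactly {0,…,m-1}; each such y ≤ maxRel lies in s1, so mex1 ≥ m
          by_contra hlt
          push Not at hlt
          have hmex1mem : mex1 ∈ seen1 :=
            mem_of_length_ge seen1 m mex1 hseen1nd hseen1bound hge (by omega) (by omega)
          obtain ⟨_, _, hc⟩ := hseen1s1 mex1 hmex1mem
          have hle : mex1 ≤ maxRel := by
            simp only [List.length_cons] at hlen
            push_cast at hlen ⊢
            omega
          exact hadv2 (hc hle)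
        · have hlen1 := length_le_of_mem_Ico seen1 m hseen1nd hseen1bound
          omega
    by_cases hsplit : mex1 ≥ m
    · rw [if_pos hsplit, if_pos (hcond.1 hsplit)]
      apply ih
      refine ⟨List.nodup_nil, List.nodup_nil, le_refl _, by simp, ?_, by simp, by simp, ?_⟩
      · intro i h0 hi; simp only [PySem.Set.empty]; omega
      · simp only [List.length_cons] at hlen
        simp only [PySem.Set.empty, List.length_nil]
        push_cast at hlen ⊢
        omega
    · rw [if_neg hsplit, if_neg (fun h => hsplit (hcond.2 h))]
      apply ih
      refine ⟨hs1nd, hseen1nd, by omega, hadv2, hbelow1, hseen1s1, hs1seen1, ?_⟩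
      simp only [List.length_cons] at hlen
      push_cast at hlen hseen1len ⊢
      omega

-- ===== VERDICT (by name: the statement is the Claim_ definition above) =====
theorem check_spec : Claim_equal_check := by
  intro v k m _
  unfold Spec_check check check_alt
  have h := go_eq ((v.length : Int) + 1) m v 0 [] [] 0 (by
    refine ⟨List.nodup_nil, List.nodup_nil, le_refl _, by simp, ?_, by simp, by simp, ?_⟩
    · intro i h0 hi; omega
    · simp only [List.length_nil]; push_cast; omega)
  simp only [PySem.Set.empty]
  simp only [h]
  rfl
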